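-- pv_equiv track=rewrite | github.com/pparian/python-ds-a | chapter-06.py | is_matched_html
-- ===== SOURCE A (Python) =====
-- class ArrayStack:
--     """
--     LIFO Stack implementation using a Python list as underlying storage.
--     """
--     def __init__(self):
--         """
--         Create an empty stack.
--         """
--         self._data = []
--
--     def __len__(self):
--         """
--         Return the number of elements in the stack.
--         """
--
--     def is_empty(self):
--         """
--         Return True if the stack is empty.
--         """
--         return len(self._data) == 0
--
--     def push(self, e):
--         """
--         Add element e to the top of the stack.
--         """
--         self._data.append(e)
--
--     def top(self):
--         """
--         Return (but do not remove) the element at the top of the stack.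
--
--         Raise Empty exception if the stack is empty
--         """
--         if self.is_empty():
--             raise Empty("Stack is empty")
--         return self._data[-1]
--
--     def pop(self):
--         """
--         Remove and return the element from the stack (i.e., LIFO).
--
--         Raise Empty exception if the stack is empty.
--         """
--         if self.is_empty():
--             raise Empty("Stack is empty")
--         return self._data.pop()
--
-- def is_matched_html(raw):
--     """
--     Return True if all HTML tags are properly matched; False otherwise.
--     """
--     S = ArrayStack()
--     j = raw.find("<")
--     while j != -1:
--         k = raw.find(">", j+1)
--         if k == -1:
--             return False
--         tag = raw[j+1:k]
--         if not tag.startswith("/"):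
--             S.push(tag)
--         else:
--             if S.is_empty():
--                 return False
--             if tag[1:] != S.pop():
--                 return False
--         j = raw.find("<", k+1)
--     return S.is_empty()
-- ===== SOURCE B (Python) =====
-- def is_matched_html(raw):
--     # Phase 1: one linear character scan extracting every tag body between '<' and the next '>'.
--     tags = []
--     buf = None
--     for ch in raw:
--         if buf is None:
--             if ch == '<':
--                 buf = []
--         elif ch == '>':
--             tags.append(''.join(buf))
--             buf = None
--         else:
--             buf.append(ch)
--     if buf is not None:          # dangling '<' with no closing '>'
--         return False
--     # Phase 2: match the collected tags with a stack.
--     stack = []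
--     for tag in tags:
--         if tag.startswith('/'):
--             if not stack or stack[-1] != tag[1:]:
--                 return False
--             stack.pop()
--         else:
--             stack.append(tag)
--     return not stack
-- ===== Notes on version B (the rewrite author's own statement) =====
-- stated objective: alternative
-- what changed: A interleaves repeated str.find calls and slicing with stack operations in one while loop; B makes a single character-by-character scan that first extracts the list of tag bodies (flagging a dangling '<'), then a separate stack pass over the collected tags.
import Mathlib
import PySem

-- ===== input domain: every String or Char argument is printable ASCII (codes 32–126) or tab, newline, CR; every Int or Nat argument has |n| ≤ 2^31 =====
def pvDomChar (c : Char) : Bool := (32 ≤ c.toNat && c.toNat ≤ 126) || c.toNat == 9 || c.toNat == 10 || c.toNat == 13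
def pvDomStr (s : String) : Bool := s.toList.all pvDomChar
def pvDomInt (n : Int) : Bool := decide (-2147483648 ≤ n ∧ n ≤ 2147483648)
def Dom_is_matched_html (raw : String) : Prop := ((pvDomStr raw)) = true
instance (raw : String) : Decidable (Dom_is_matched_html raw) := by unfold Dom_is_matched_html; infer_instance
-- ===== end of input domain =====

-- B replaces A's interleaved find/slice loop by two passes: a single character scan that
-- collects the tag bodies, then a stack pass over the collected tags (objective: alternative).

-- ===== PORT A =====
-- literal port of A's while loop; the fuel argument is only a totality guard (the found
-- index strictly increases each iteration, so length+1 iterations always suffice)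
def isMatchedLoopA (raw : String) (S : List String) (j : Int) : Nat → Bool
  | 0 => false
  | fuel + 1 =>
    if j = -1 then S.isEmpty
    else
      let k := PySem.Str.findFrom raw ">" (j + 1) none
      if k = -1 then false
      else
        let tag := PySem.Str.slice raw (some (j + 1)) (some k)
        if ¬ PySem.Str.startswith tag "/" then
          isMatchedLoopA raw (tag :: S) (PySem.Str.findFrom raw "<" (k + 1) none) fuel
        else
          match S with
          | [] => false
          | t :: S' =>
            if PySem.Str.slice tag (some 1) none ≠ t then false
            else isMatchedLoopA raw S' (PySem.Str.findFrom raw "<" (k + 1) none) fuel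

def is_matched_html (raw : String) : Bool :=
  isMatchedLoopA raw [] (PySem.Str.find raw "<") (raw.toList.length + 1)

-- ===== PORT B =====
-- phase 1 of Source B: one fold over the characters, state = (tags collected, open buffer)
def scanStepB (st : List String × Option (List Char)) (c : Char) : List String × Option (List Char) :=
  match st.2 with
  | none => if c = '<' then (st.1, some []) else (st.1, none)
  | some b => if c = '>' then (st.1 ++ [String.ofList b], none) else (st.1, some (b ++ [c]))

-- phase 2 of Source B: the stack pass over the collected tags
def matchTagsB : List String → List String → Bool
  | stack, [] => stack.isEmpty
  | stack, t :: ts =>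
    if PySem.Str.startswith t "/" then
      match stack with
      | [] => false
      | s :: rest => if s ≠ PySem.Str.slice t (some 1) none then false else matchTagsB rest ts
    else matchTagsB (t :: stack) ts

def is_matched_html_alt (raw : String) : Bool :=
  let st := raw.toList.foldl scanStepB ([], none)
  match st.2 with
  | some _ => false
  | none => matchTagsB [] st.1

-- ===== PRECONDITION & SPEC =====
def Spec_is_matched_html (raw : String) (out : Bool) : Prop := out = is_matched_html_alt raw
instance (raw : String) (out : Bool) : Decidable (Spec_is_matched_html raw out) := by unfold Spec_is_matched_html; infer_instance

-- ===== CLAIM (what is proved, stated in full; the proofs are below) =====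
def Claim_equal_is_matched_html : Prop := ∀ (raw : String), Dom_is_matched_html raw → Spec_is_matched_html raw (is_matched_html raw)

-- ===== LEMMAS AND PROOFS =====

-- common reference machine: outside-tag mode / inside-tag mode (buffer, stack)
mutual
def machOut : List Char → List String → Bool
  | [], S => S.isEmpty
  | c :: r, S => if c = '<' then machIn r [] S else machOut r S
def machIn : List Char → List Char → List String → Bool
  | [], _, _ => false
  | c :: r, b, S =>
    if c = '>' then
      let tag := String.ofList b
      if ¬ PySem.Str.startswith tag "/" then machOut r (tag :: S)
      else match S with
        | [] => false
        | t :: S' =>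
          if PySem.Str.slice tag (some 1) none ≠ t then false
          else machOut r S'
    else machIn r (b ++ [c]) S
end

-- partial run of the tag-matching pass, returning the stack (none = failure)
def runTags : List String → List String → Option (List String)
  | S, [] => some S
  | S, t :: ts =>
    if PySem.Str.startswith t "/" then
      match S with
      | [] => none
      | s :: rest => if s ≠ PySem.Str.slice t (some 1) none then none else runTags rest ts
    else runTags (t :: S) ts

theorem matchTagsB_eq_runTags (ts : List String) : ∀ S, matchTagsB S ts = (runTags S ts).elim false List.isEmpty := by
  induction ts with
  | nil => intro S; simp [matchTagsB, runTags]
  | cons t ts ih =>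
    intro S
    simp only [matchTagsB, runTags]
    split_ifs with h
    · cases S with
      | nil => simp
      | cons s rest =>
        dsimp only
        split_ifs with h2 <;> simp [ih]
    · exact ih _

theorem runTags_append (ts us : List String) : ∀ S, runTags S (ts ++ us) =
    match runTags S ts with | none => none | some S' => runTags S' us := by
  induction ts with
  | nil => intro S; simp [runTags]
  | cons t ts ih =>
    intro S
    simp only [List.cons_append, runTags]
    split_ifs with h
    · cases S with
      | nil => rfl
      | cons s rest =>
        dsimp only
        split_ifs with h2 <;> simp [ih]
    · exact ih _

theorem scan_machine (r : List Char) : ∀ (tags : List String) (bufOpt : Option (List Char)),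
    (match (List.foldl scanStepB (tags, bufOpt) r).2 with
     | some _ => false
     | none => matchTagsB [] (List.foldl scanStepB (tags, bufOpt) r).1)
    = (match runTags [] tags with
       | none => false
       | some S => match bufOpt with | none => machOut r S | some b => machIn r b S) := by
  induction r with
  | nil =>
    intro tags bufOpt
    cases bufOpt with
    | none =>
      simp only [List.foldl_nil]
      rw [matchTagsB_eq_runTags]
      cases h : runTags [] tags <;> simp [machOut, h]
    | some b =>
      simp only [List.foldl_nil]
      cases h : runTags [] tags <;> simp [machIn, h]
  | cons c r ih =>
    intro tags bufOpt
    cases bufOpt with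
    | none =>
      by_cases hc : c = '<'
      · simp only [List.foldl_cons, scanStepB, hc, if_pos rfl]
        rw [ih]
        cases h : runTags [] tags <;> simp [machOut, h]
      · simp only [List.foldl_cons, scanStepB, if_neg hc]
        rw [ih]
        cases h : runTags [] tags <;> simp [machOut, hc, h]
    | some b =>
      by_cases hc : c = '>'
      · subst hc
        simp only [List.foldl_cons, scanStepB, ite_true, reduceIte]
        rw [ih, runTags_append]
        cases h : runTags [] tags with
        | none => simp
        | some S =>
          simp only [machIn, ite_true, reduceIte]
          simp only [runTags]
          split_ifs with h1
          · cases S with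
            | nil => simp
            | cons s rest =>
              by_cases h2 : s ≠ PySem.Str.slice (String.ofList b) (some 1) none
              · simp [h2, ne_comm.mp h2]
              · push_neg at h2
                simp [h2, runTags]
          · simp [runTags]
      · simp only [List.foldl_cons, scanStepB, if_neg hc]
        rw [ih]
        cases h : runTags [] tags <;> simp [machIn, hc, h]

theorem alt_eq_mach (raw : String) : is_matched_html_alt raw = machOut raw.toList [] := by
  have := scan_machine raw.toList [] none
  simpa [is_matched_html_alt, runTags] using this

-- A-side machine facts
theorem machOut_skip (ws l : List Char) (S : List String) :
    '<' ∉ ws → machOut (ws ++ l) S = machOut l S := by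
  induction ws with
  | nil => intro _; rfl
  | cons c ws ih =>
    intro hws
    simp only [List.mem_cons, not_or] at hws
    simp only [List.cons_append, machOut]
    rw [if_neg (fun h => hws.1 h.symm), ih hws.2]

theorem machOut_no_lt (l : List Char) (hl : '<' ∉ l) (S : List String) : machOut l S = S.isEmpty := by
  have := machOut_skip l [] S hl
  simpa using this

theorem machIn_skip (ws : List Char) (hws : '>' ∉ ws) (l : List Char) :
    ∀ (b : List Char) (S : List String), machIn (ws ++ l) b S = machIn l (b ++ ws) S := by
  induction ws with
  | nil => intro b S; simp
  | cons c ws ih =>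
    intro b S
    simp only [List.mem_cons, not_or] at hws
    simp only [List.cons_append, machIn]
    rw [if_neg (fun h => hws.1 h.symm), ih hws.2]
    simp

theorem machIn_no_gt (l : List Char) (hl : '>' ∉ l) : ∀ (b : List Char) (S : List String), machIn l b S = false := by
  induction l with
  | nil => intro b S; rfl
  | cons c r ih =>
    intro b S
    simp only [List.mem_cons, not_or] at hl
    simp only [machIn]
    rw [if_neg (fun h => hl.1 h.symm)]
    exact ih hl.2 _ _

theorem singleton_prefix_iff {c : Char} {l : List Char} : ([c] <+: l) ↔ l.head? = some c := by
  cases l <;> simp [List.cons_prefix_cons, eq_comm]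

theorem infix_singleton_iff {c : Char} {l : List Char} : ([c] <:+: l) ↔ c ∈ l := by
  constructor
  · intro h; exact h.subset (by simp)
  · intro h
    obtain ⟨a, b, rfl⟩ := List.append_of_mem h
    exact ⟨a, b, by simp⟩

set_option maxHeartbeats 1600000 in
theorem aloop_eq_mach (raw : String) : ∀ (fuel : Nat) (p : Nat) (S : List String),
    p ≤ raw.toList.length → raw.toList.length - p < fuel →
    isMatchedLoopA raw S (PySem.Chars.findFrom raw.toList ['<'] (p : Int) none) fuel
      = machOut (raw.toList.drop p) S := by
  intro fuel
  induction fuel with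
  | zero => intro p S hp hf; omega
  | succ f ih =>
    intro p S hp hf
    set L := raw.toList with hL
    by_cases hj : PySem.Chars.findFrom L ['<'] (p : Int) none = -1
    · rw [hj]
      simp only [isMatchedLoopA, if_pos rfl]
      have hnolt : '<' ∉ L.drop p := by
        have := (PySem.Chars.findFrom_natCast_eq_neg_one_iff L ['<'] p hp).mp hj
        intro hm; exact this (infix_singleton_iff.mpr hm)
      exact (machOut_no_lt _ hnolt S).symm
    · obtain ⟨hpj, hpre, hmin⟩ := PySem.Chars.findFrom_natCast_spec L ['<'] p hp hj
      set j := PySem.Chars.findFrom L ['<'] (p : Int) none with hjdef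
      have hj0 : 0 ≤ j := le_trans (by positivity) hpj
      set jn := j.toNat with hjn
      have hjcast : j = (jn : Int) := (Int.toNat_of_nonneg hj0).symm
      have hpjn : p ≤ jn := by omega
      have hj' : L[jn]? = some '<' := by
        have := singleton_prefix_iff.mp hpre
        rwa [List.head?_drop] at this
      obtain ⟨hjlen, hjget⟩ := List.getElem?_eq_some_iff.mp hj'
      have hdropj : L.drop jn = '<' :: L.drop (jn + 1) := by
        rw [List.drop_eq_getElem_cons hjlen, hjget]
      have hdecomp : L.drop p = (L.drop p).take (jn - p) ++ ('<' :: L.drop (jn + 1)) := by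
        rw [← hdropj]
        have h1 : L.drop jn = (L.drop p).drop (jn - p) := by
          rw [List.drop_drop]; congr 1; omega
        rw [h1, List.take_append_drop]
      have hmid_no_lt : '<' ∉ (L.drop p).take (jn - p) := by
        intro hm
        obtain ⟨i, hi, hget⟩ := List.mem_iff_getElem.mp hm
        rw [List.getElem_take, List.getElem_drop] at hget
        have hi' : i < jn - p := by
          have h2 := hi; simp only [List.length_take, lt_min_iff] at h2; omega
        have hlen : p + i < L.length := by omega
        refine hmin (p + i) (by omega) (by omega) ?_
        rw [singleton_prefix_iff, List.head?_drop, List.getElem?_eq_getElem hlen, hget]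
      rw [hjcast]
      simp only [isMatchedLoopA]
      rw [if_neg (by omega)]
      have hcast1 : ((jn : Int) + 1) = ((jn + 1 : Nat) : Int) := by push_cast; ring
      have hjn1 : jn + 1 ≤ L.length := hjlen
      have hRHS : machOut (L.drop p) S = machIn (L.drop (jn + 1)) [] S := by
        rw [hdecomp, machOut_skip _ _ _ hmid_no_lt]
        simp [machOut]
      have hsubgt : (">" : String).toList = ['>'] := by decide
      have hsublt : ("<" : String).toList = ['<'] := by decide
      by_cases hk : PySem.Chars.findFrom L ['>'] ((jn + 1 : Nat) : Int) none = -1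
      · rw [PySem.Str.findFrom_eq, hcast1, hsubgt, ← hL, hk]
        rw [if_pos rfl, hRHS]
        have hnogt : '>' ∉ L.drop (jn + 1) := by
          have := (PySem.Chars.findFrom_natCast_eq_neg_one_iff L ['>'] (jn + 1) hjn1).mp hk
          intro hm; exact this (infix_singleton_iff.mpr hm)
        exact (machIn_no_gt _ hnogt [] S).symm
      · obtain ⟨hk1, hkpre, hkmin⟩ := PySem.Chars.findFrom_natCast_spec L ['>'] (jn + 1) hjn1 hk
        set k := PySem.Chars.findFrom L ['>'] ((jn + 1 : Nat) : Int) none with hkdef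
        have hk0 : 0 ≤ k := le_trans (by positivity) hk1
        set kn := k.toNat with hkn
        have hkcast : k = (kn : Int) := (Int.toNat_of_nonneg hk0).symm
        have hjk : jn + 1 ≤ kn := by omega
        have hk' : L[kn]? = some '>' := by
          have := singleton_prefix_iff.mp hkpre
          rwa [List.head?_drop] at this
        obtain ⟨hklen, hkget⟩ := List.getElem?_eq_some_iff.mp hk'
        have hdropk : L.drop kn = '>' :: L.drop (kn + 1) := by
          rw [List.drop_eq_getElem_cons hklen, hkget]
        set mid := (L.drop (jn + 1)).take (kn - (jn + 1)) with hmid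
        have hmid_no_gt : '>' ∉ mid := by
          intro hm
          rw [hmid] at hm
          obtain ⟨i, hi, hget⟩ := List.mem_iff_getElem.mp hm
          rw [List.getElem_take, List.getElem_drop] at hget
          have hi' : i < kn - (jn + 1) := by
            have h2 := hi; simp only [List.length_take, lt_min_iff] at h2; omega
          have hlen : jn + 1 + i < L.length := by omega
          refine hkmin (jn + 1 + i) (by omega) (by omega) ?_
          rw [singleton_prefix_iff, List.head?_drop, List.getElem?_eq_getElem hlen, hget]
        have hdecomp2 : L.drop (jn + 1) = mid ++ ('>' :: L.drop (kn + 1)) := by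
          rw [← hdropk, hmid]
          have h1 : L.drop kn = (L.drop (jn + 1)).drop (kn - (jn + 1)) := by
            rw [List.drop_drop]; congr 1; omega
          rw [h1, List.take_append_drop]
        rw [PySem.Str.findFrom_eq, hcast1, ← hL, hsubgt, ← hkdef]
        rw [if_neg (by omega)]
        have htag' : (PySem.Str.slice raw (some ((jn + 1 : Nat) : Int)) (some k)).toList = mid := by
          rw [PySem.Str.toList_slice, PySem.Chars.slice_eq_listSlice, ← hL, hkcast,
            PySem.List.slice_natCast]
        have htag : PySem.Str.slice raw (some ((jn + 1 : Nat) : Int)) (some k) = String.ofList mid := by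
          rw [← htag', String.ofList_toList]
        simp only [htag]
        have hRHS2 : machIn (L.drop (jn + 1)) [] S = machIn ('>' :: L.drop (kn + 1)) mid S := by
          rw [hdecomp2, machIn_skip mid hmid_no_gt]
          simp
        rw [hRHS, hRHS2]
        simp only [machIn, ite_true, reduceIte]
        have hrec : ∀ S' : List String,
            isMatchedLoopA raw S' (PySem.Str.findFrom raw "<" (k + 1) none) f
              = machOut (L.drop (kn + 1)) S' := by
          intro S'
          rw [PySem.Str.findFrom_eq, ← hL, hsublt, hkcast]
          have hc2 : ((kn : Int) + 1) = ((kn + 1 : Nat) : Int) := by push_cast; ring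
          rw [hc2]
          exact ih (kn + 1) S' (by omega) (by omega)
        by_cases hst : PySem.Str.startswith (String.ofList mid) "/"
        · simp only [hst, not_true_eq_false, if_false]
          cases S with
          | nil => rfl
          | cons t S' =>
            dsimp only
            by_cases hne : PySem.Str.slice (String.ofList mid) (some 1) none ≠ t
            · simp [hne]
            · push_neg at hne
              simp only [hne, ne_eq, not_true_eq_false, if_false]
              exact hrec S'
        · simp only [hst, not_false_eq_true, if_true]
          exact hrec _

theorem a_eq_mach (raw : String) : is_matched_html raw = machOut raw.toList [] := by
  unfold is_matched_html
  rw [PySem.Str.find_eq]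
  have hsub2 : ("<" : String).toList = ['<'] := by decide
  rw [hsub2, ← PySem.Chars.findFrom_zero]
  have := aloop_eq_mach raw (raw.toList.length + 1) 0 [] (by omega) (by omega)
  simpa using this

-- ===== VERDICT (by name: the statement is the Claim_ definition above) =====
theorem is_matched_html_spec : Claim_equal_is_matched_html := by
  intro raw _
  unfold Spec_is_matched_html
  rw [a_eq_mach, alt_eq_mach]
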